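-- pv_equiv track=rewrite | github.com/eigebi/Partial-Aggregation-Asynchronous-SFL | models.py | _build_prefix_index
-- ===== SOURCE A (Python) =====
-- from typing import Dict, List, Optional, Set, Iterable, Tuple
--
-- def _build_prefix_index(keys: List[str]) -> Dict[str, List[str]]:
--     pref: Dict[str, List[str]] = {}
--     for k in keys:
--         parts = k.split(".")
--         cur = []
--         for i in range(len(parts)):
--             cur.append(parts[i])
--             p = ".".join(cur)
--             pref.setdefault(p, []).append(k)
--     return pref
-- ===== SOURCE B (Python) =====
-- def _build_prefix_index(keys):
--     pref = {}
--     for k in keys: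
--         for i, ch in enumerate(k):
--             if ch == '.':
--                 pref.setdefault(k[:i], []).append(k)
--         pref.setdefault(k, []).append(k)
--     return pref
-- ===== Notes on version B (the rewrite author's own statement) =====
-- stated objective: alternative
-- what changed: B drops A's split('.')/growing-parts-list/repeated '.'.join machinery: it scans each key's characters once and registers the slice k[:i] at every dot position, then the full key, exploiting that those slices are exactly the cumulative joins.
import Mathlib
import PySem

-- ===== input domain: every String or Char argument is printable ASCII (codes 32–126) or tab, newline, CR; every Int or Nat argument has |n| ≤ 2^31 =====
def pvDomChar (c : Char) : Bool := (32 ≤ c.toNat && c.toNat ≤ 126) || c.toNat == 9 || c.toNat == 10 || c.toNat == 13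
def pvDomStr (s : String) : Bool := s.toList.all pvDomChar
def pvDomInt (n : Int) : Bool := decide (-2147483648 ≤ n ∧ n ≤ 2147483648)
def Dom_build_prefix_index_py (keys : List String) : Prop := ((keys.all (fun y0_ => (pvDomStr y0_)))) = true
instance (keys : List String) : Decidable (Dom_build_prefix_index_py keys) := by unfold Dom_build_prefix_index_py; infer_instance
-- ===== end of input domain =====

-- B replaces A's split('.')/cumulative-join construction by a single scan over each key's
-- character positions, slicing k[:i] at every dot (objective: alternative decomposition, same cost).
-- Both ports return the dict as its insertion-ordered items list.

-- ===== PORT A =====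
-- 'pref.setdefault(p, []).append(k)' is exactly 'pref[p] = pref.get(p, []) + [k]' = Dict.modify p [] (· ++ [k]).
-- The inner 'for i in range(len(parts)): cur.append(parts[i]); …' is ported as a fold over parts in
-- order (i visits each index of parts exactly once, so parts[i] never raises).
def pvAstep (k : String) (st : List String × PySem.Dict String (List String)) (part : String) :
    List String × PySem.Dict String (List String) :=
  let cur := st.1 ++ [part]
  let p := PySem.Str.join "." cur
  (cur, st.2.modify p [] (· ++ [k]))

def pvAkey (pref : PySem.Dict String (List String)) (k : String) : PySem.Dict String (List String) :=
  let parts := (PySem.Str.split? k ".").getD []   -- sep "." is nonempty, so split? is always some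
  (parts.foldl (pvAstep k) ([], pref)).2

def build_prefix_index_py (keys : List String) : List (String × List String) :=
  (keys.foldl pvAkey PySem.Dict.empty).items

-- ===== PORT B =====
def pvBstep (k : String) (d : PySem.Dict String (List String)) (ic : Int × Char) :
    PySem.Dict String (List String) :=
  if ic.2 == '.' then d.modify (PySem.Str.slice k none (some ic.1)) [] (· ++ [k]) else d

def pvBkey (pref : PySem.Dict String (List String)) (k : String) : PySem.Dict String (List String) :=
  let pref := (PySem.List.enumerate k.toList 0).foldl (pvBstep k) pref
  pref.modify k [] (· ++ [k])

def build_prefix_index_py_alt (keys : List String) : List (String × List String) :=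
  (keys.foldl pvBkey PySem.Dict.empty).items

-- ===== PRECONDITION & SPEC =====
def Spec_build_prefix_index_py (keys : List String) (out : List (String × List String)) : Prop := out = build_prefix_index_py_alt keys
instance (keys : List String) (out : List (String × List String)) : Decidable (Spec_build_prefix_index_py keys out) := by unfold Spec_build_prefix_index_py; infer_instance

-- ===== CLAIM (what is proved, stated in full; the proofs are below) =====
def Claim_equal_build_prefix_index_py : Prop := ∀ (keys : List String), Dom_build_prefix_index_py keys → Spec_build_prefix_index_py keys (build_prefix_index_py keys)

-- ===== LEMMAS AND PROOFS =====

-- structural version of splitOn on '.' : (first part, remaining parts)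
def pvSp : List Char → List Char × List (List Char)
  | [] => ([], [])
  | c :: r => if c = '.' then ([], (pvSp r).1 :: (pvSp r).2) else (c :: (pvSp r).1, (pvSp r).2)

-- cumulative '.'-joined prefixes of a parts list, with the already-joined-plus-dot accumulator
def pvPjoins : List Char → List (List Char) → List (List Char)
  | _, [] => []
  | acc, p :: ps => (acc ++ p) :: pvPjoins (acc ++ p ++ ['.']) ps

-- prefixes of cs cut at each '.' position
def pvDotpref : List Char → List (List Char)
  | [] => []
  | c :: r => (if c = '.' then [[]] else []) ++ (pvDotpref r).map (c :: ·)

-- the strings A's inner loop feeds to setdefault, in order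
def pvEmitA : List String → List String → List String
  | _, [] => []
  | cur, p :: ps => PySem.Str.join "." (cur ++ [p]) :: pvEmitA (cur ++ [p]) ps

-- join of a parts prefix, plus a trailing dot when nonempty
def pvJacc : List (List Char) → List Char
  | [] => []
  | x :: xs => List.intercalate ['.'] (x :: xs) ++ ['.']

theorem pvGo_eq : ∀ (fuel : Nat) (l cur : List Char) (acc : List (List Char)), l.length ≤ fuel →
    PySem.Chars.splitOn.go ['.'] fuel l cur acc
      = acc.reverse ++ (cur.reverse ++ (pvSp l).1) :: (pvSp l).2 := by
  intro fuel
  induction fuel with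
  | zero =>
    intro l cur acc h
    have : l = [] := List.eq_nil_of_length_eq_zero (Nat.le_zero.mp h)
    subst this
    simp [PySem.Chars.splitOn.go, pvSp]
  | succ n ih =>
    intro l cur acc h
    cases l with
    | nil => simp [PySem.Chars.splitOn.go, pvSp]
    | cons c rest =>
      by_cases hc : c = '.'
      · subst hc
        rw [PySem.Chars.splitOn.go]
        simp only [List.isPrefixOf, BEq.rfl, Bool.true_and, if_pos]
        show PySem.Chars.splitOn.go ['.'] n rest [] (cur.reverse :: acc) = _
        rw [ih rest [] _ (by simpa using Nat.le_of_succ_le_succ h)]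
        simp [pvSp]
      · rw [PySem.Chars.splitOn.go]
        have hp : (['.'].isPrefixOf (c :: rest)) = false := by
          simp [List.isPrefixOf]; exact fun h' => (hc h'.symm).elim
        rw [hp]
        simp only [Bool.false_eq_true, if_false]
        rw [ih rest (c :: cur) acc (by simpa using Nat.le_of_succ_le_succ h)]
        simp [pvSp, hc]

theorem pvSplitOn_eq (cs : List Char) :
    PySem.Chars.splitOn cs ['.'] = (pvSp cs).1 :: (pvSp cs).2 := by
  unfold PySem.Chars.splitOn
  rw [pvGo_eq (cs.length + 1) cs [] [] (by omega)]
  simp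

theorem pvPjoins_append : ∀ (ps : List (List Char)) (a b : List Char),
    pvPjoins (a ++ b) ps = (pvPjoins b ps).map (a ++ ·) := by
  intro ps
  induction ps with
  | nil => intro a b; simp [pvPjoins]
  | cons p t ih =>
    intro a b
    simp only [pvPjoins, List.map_cons, List.append_assoc, List.cons.injEq]
    exact ⟨trivial, ih a (b ++ (p ++ ['.']))⟩

theorem pvCore : ∀ cs : List Char,
    pvPjoins [] ((pvSp cs).1 :: (pvSp cs).2) = pvDotpref cs ++ [cs] := by
  intro cs
  induction cs with
  | nil => simp [pvSp, pvPjoins, pvDotpref]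
  | cons c r ih =>
    by_cases hc : c = '.'
    · subst hc
      have h1 : (pvSp ('.' :: r)).1 = [] := by simp [pvSp]
      have h2 : (pvSp ('.' :: r)).2 = (pvSp r).1 :: (pvSp r).2 := by simp [pvSp]
      have h3 : pvDotpref ('.' :: r) = [[]] ++ (pvDotpref r).map (fun x => '.' :: x) := by
        simp [pvDotpref]
      rw [h1, h2, h3]
      have h4 : pvPjoins [] ([] :: (pvSp r).1 :: (pvSp r).2)
          = [] :: pvPjoins ['.'] ((pvSp r).1 :: (pvSp r).2) := by simp [pvPjoins]
      rw [h4]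
      have h5 := pvPjoins_append ((pvSp r).1 :: (pvSp r).2) ['.'] []
      simp only [List.append_nil] at h5
      rw [h5, ih]
      simp
    · have h1 : (pvSp (c :: r)).1 = c :: (pvSp r).1 := by simp [pvSp, hc]
      have h2 : (pvSp (c :: r)).2 = (pvSp r).2 := by simp [pvSp, hc]
      have h3 : pvDotpref (c :: r) = (pvDotpref r).map (fun x => c :: x) := by
        simp [pvDotpref, hc]
      rw [h1, h2, h3]
      have h4 : pvPjoins [] ((c :: (pvSp r).1) :: (pvSp r).2)
          = (c :: (pvSp r).1) :: pvPjoins ((c :: (pvSp r).1) ++ ['.']) (pvSp r).2 := by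
        simp [pvPjoins]
      rw [h4]
      have h6 : pvPjoins [] ((pvSp r).1 :: (pvSp r).2)
          = (pvSp r).1 :: pvPjoins ((pvSp r).1 ++ ['.']) (pvSp r).2 := by simp [pvPjoins]
      rw [h6] at ih
      have h7 : ((pvSp r).1 :: pvPjoins ((pvSp r).1 ++ ['.']) (pvSp r).2).map (fun x => c :: x)
          = (pvDotpref r ++ [r]).map (fun x => c :: x) := by rw [ih]
      simp only [List.map_cons, List.map_append, List.map_nil] at h7
      have h5 := pvPjoins_append (pvSp r).2 [c] ((pvSp r).1 ++ ['.'])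
      simp only [List.singleton_append] at h5
      rw [show (c :: (pvSp r).1) ++ ['.'] = c :: ((pvSp r).1 ++ ['.']) from rfl, h5]
      exact h7

theorem pvIntercalate_append_last : ∀ (xss : List (List Char)) (ys : List Char),
    List.intercalate ['.'] (xss ++ [ys]) = pvJacc xss ++ ys := by
  intro xss
  induction xss with
  | nil => intro ys; simp [pvJacc, List.intercalate]
  | cons x xs ih =>
    intro ys
    cases xs with
    | nil => simp [pvJacc, List.intercalate]
    | cons z zs =>
      have h1 : List.intercalate ['.'] (x :: ((z :: zs) ++ [ys]))
          = x ++ ['.'] ++ List.intercalate ['.'] ((z :: zs) ++ [ys]) := by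
        simp [List.intercalate]
      have h2 : List.intercalate ['.'] (x :: z :: zs)
          = x ++ ['.'] ++ List.intercalate ['.'] (z :: zs) := by
        simp [List.intercalate]
      have ih' := ih ys
      simp only [List.cons_append] at h1 ih' ⊢
      rw [h1, ih']
      simp [pvJacc, h2, List.append_assoc]

theorem pvJacc_append (xss : List (List Char)) (ys : List Char) :
    pvJacc (xss ++ [ys]) = pvJacc xss ++ ys ++ ['.'] := by
  cases xss with
  | nil => simp [pvJacc, List.intercalate]
  | cons x xs =>
    have h : pvJacc (x :: (xs ++ [ys])) = List.intercalate ['.'] (x :: (xs ++ [ys])) ++ ['.'] := rfl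
    have h2 := pvIntercalate_append_last (x :: xs) ys
    simp only [List.cons_append] at h2 ⊢
    rw [h, h2]

theorem pvEmitA_eq : ∀ (ps cur : List String),
    pvEmitA cur ps
      = (pvPjoins (pvJacc (cur.map String.toList)) (ps.map String.toList)).map String.ofList := by
  intro ps
  induction ps with
  | nil => intro cur; simp [pvEmitA, pvPjoins]
  | cons p t ih =>
    intro cur
    simp only [pvEmitA, List.map_cons, pvPjoins, List.map_cons]
    congr 1
    · -- head: ".".join(cur + [p])
      show PySem.Str.join "." (cur ++ [p])
          = String.ofList (pvJacc (cur.map String.toList) ++ p.toList)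
      have hdot : ("." : String).toList = ['.'] := rfl
      rw [← pvIntercalate_append_last]
      simp [PySem.Str.join, PySem.Chars.join, hdot]
    · rw [ih (cur ++ [p])]
      congr 1
      simp only [List.map_append, List.map_cons, List.map_nil]
      rw [pvJacc_append]

theorem pvAfold_eq : ∀ (parts cur : List String) (k : String)
    (d : PySem.Dict String (List String)),
    (parts.foldl (pvAstep k) (cur, d)).2
      = (pvEmitA cur parts).foldl (fun d p => d.modify p [] (· ++ [k])) d := by
  intro parts
  induction parts with
  | nil => intro cur k d; simp [pvEmitA]
  | cons p t ih =>
    intro cur k d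
    simp only [List.foldl_cons, pvAstep, pvEmitA]
    exact ih (cur ++ [p]) k _

theorem pvBfold_eq : ∀ (rest pre : List Char) (k : String)
    (d : PySem.Dict String (List String)), k.toList = pre ++ rest →
    (PySem.List.enumerate rest (pre.length : Int)).foldl (pvBstep k) d
      = ((pvDotpref rest).map (fun p => String.ofList (pre ++ p))).foldl
          (fun d p => d.modify p [] (· ++ [k])) d := by
  intro rest
  induction rest with
  | nil => intro pre k d _; simp [pvDotpref, PySem.List.enumerate_nil]
  | cons c t ih =>
    intro pre k d hk
    rw [PySem.List.enumerate_cons]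
    have hslice : PySem.Str.slice k none (some (pre.length : Int)) = String.ofList pre := by
      have h1 : (PySem.Str.slice k none (some (pre.length : Int))).toList = pre := by
        rw [PySem.Str.toList_slice, PySem.Chars.slice_eq_listSlice,
          PySem.List.slice_to_natCast, hk]
        simp
      have h2 := congrArg String.ofList h1
      rw [String.ofList_toList] at h2
      exact h2
    have hpre' : k.toList = (pre ++ [c]) ++ t := by simpa using hk
    have hlen : (pre.length : Int) + 1 = ((pre ++ [c]).length : Int) := by
      simp
    by_cases hc : c = '.'
    · subst hc
      simp only [List.foldl_cons, pvBstep]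
      rw [if_pos (by simp), hslice, hlen, ih (pre ++ ['.']) k _ hpre']
      have hd : pvDotpref ('.' :: t) = [[]] ++ (pvDotpref t).map (fun x => '.' :: x) := by
        simp [pvDotpref]
      rw [hd]
      simp only [List.map_cons, List.map_map, List.foldl_cons, List.append_nil,
        List.singleton_append]
      have hcomp : ((fun p => String.ofList (pre ++ p)) ∘ (fun x => '.' :: x))
          = (fun p => String.ofList (pre ++ ['.'] ++ p)) := by
        funext x; simp
      rw [hcomp]
    · simp only [List.foldl_cons, pvBstep]
      rw [if_neg (by simp [hc]), hlen, ih (pre ++ [c]) k d hpre']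
      have hd : pvDotpref (c :: t) = (pvDotpref t).map (fun x => c :: x) := by
        simp [pvDotpref, hc]
      rw [hd]
      simp only [List.map_map]
      have hcomp : ((fun p => String.ofList (pre ++ p)) ∘ (fun x => c :: x))
          = (fun p => String.ofList (pre ++ [c] ++ p)) := by
        funext x; simp
      rw [hcomp]

-- per-key agreement, then fold the keys
theorem pvKey_eq : ∀ (d : PySem.Dict String (List String)) (k : String),
    pvAkey d k = pvBkey d k := by
  intro d k
  show ((((PySem.Str.split? k ".").getD []).foldl (pvAstep k) ([], d)).2)
      = ((PySem.List.enumerate k.toList 0).foldl (pvBstep k) d).modify k [] (· ++ [k])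
  have hsplit : (PySem.Str.split? k ".").getD []
      = ((pvSp k.toList).1 :: (pvSp k.toList).2).map String.ofList := by
    have hdot : ("." : String).toList = ['.'] := rfl
    simp [PySem.Str.split?, PySem.Chars.split?, hdot, pvSplitOn_eq]
  rw [hsplit, pvAfold_eq, pvEmitA_eq]
  have htl : ((((pvSp k.toList).1 :: (pvSp k.toList).2).map String.ofList).map String.toList)
      = (pvSp k.toList).1 :: (pvSp k.toList).2 := by simp [Function.comp_def]
  rw [htl]
  rw [show pvJacc (([] : List String).map String.toList) = [] from rfl]
  rw [pvCore]
  simp only [List.map_append, List.map_cons, List.map_nil, List.foldl_append,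
    List.foldl_cons, List.foldl_nil]
  have hb := pvBfold_eq k.toList [] k d (by simp)
  simp only [List.length_nil, Nat.cast_zero, List.nil_append] at hb
  rw [hb]
  simp

theorem pvFold_eq : ∀ (keys : List String) (d : PySem.Dict String (List String)),
    keys.foldl pvAkey d = keys.foldl pvBkey d := by
  intro keys
  induction keys with
  | nil => intro d; rfl
  | cons k t ih => intro d; simp only [List.foldl_cons, pvKey_eq]; exact ih _

-- ===== VERDICT (by name: the statement is the Claim_ definition above) =====
theorem build_prefix_index_py_spec : Claim_equal_build_prefix_index_py := by
  intro keys _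
  unfold Spec_build_prefix_index_py build_prefix_index_py build_prefix_index_py_alt
  rw [pvFold_eq]
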